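-- pv_equiv track=rewrite | github.com/pphongsavan/pkmn-type-coverage | project.py | create_se_sets
-- ===== SOURCE A (Python) =====
-- def create_se_set(types, type_to_se_dict):
--     se = set()
--     for t in types:
--         for i in type_to_se_dict[t]:
--             se.add(i)
--     return se
--
-- def create_se_sets(combos, type_to_se_dict):
--     types_to_se = {}
--     se_lens = {}
--
--     for c in combos:
--         curr = create_se_set(c, type_to_se_dict)
--         if len(curr) in se_lens:
--             se_lens[len(curr)].append(c)
--         else:
--             se_lens[len(curr)] = [c]
--         types_to_se[c] = curr
--
--     return se_lens, types_to_se
-- ===== SOURCE B (Python) =====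
-- def create_se_sets(combos, type_to_se_dict):
--     # one comprehension pass computing each combo's union set, then group-by-size via
--     # ordered dedup of the sizes + a filter per distinct size (no incremental dict building)
--     se = [set().union(*(type_to_se_dict[t] for t in c)) for c in combos]
--     sizes = dict.fromkeys(len(s) for s in se)
--     se_lens = {L: [c for c, s in zip(combos, se) if len(s) == L] for L in sizes}
--     types_to_se = dict(zip(combos, se))
--     return se_lens, types_to_se
-- ===== Notes on version B (the rewrite author's own statement) =====
-- stated objective: alternative
-- what changed: A builds both dicts incrementally in one loop (append-or-create per size key); B computes all union sets in one comprehension, then forms the size groups by ordered deduplication of the sizes with one filter per distinct size, and the types_to_se dict directly from zip(combos, se).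
import Mathlib
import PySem

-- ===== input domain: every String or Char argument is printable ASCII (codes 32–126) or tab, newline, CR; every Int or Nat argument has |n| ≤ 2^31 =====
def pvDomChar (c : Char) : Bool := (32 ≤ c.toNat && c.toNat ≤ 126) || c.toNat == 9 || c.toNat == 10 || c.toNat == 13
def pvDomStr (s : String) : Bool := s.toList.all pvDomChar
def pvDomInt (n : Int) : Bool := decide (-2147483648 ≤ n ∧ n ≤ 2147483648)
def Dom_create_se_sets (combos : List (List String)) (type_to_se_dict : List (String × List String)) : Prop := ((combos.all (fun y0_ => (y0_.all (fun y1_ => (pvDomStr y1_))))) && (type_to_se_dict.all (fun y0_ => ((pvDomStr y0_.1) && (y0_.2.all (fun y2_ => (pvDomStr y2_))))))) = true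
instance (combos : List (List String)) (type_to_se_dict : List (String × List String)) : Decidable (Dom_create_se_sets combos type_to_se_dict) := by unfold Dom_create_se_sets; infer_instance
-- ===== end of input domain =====

-- B replaces A's single loop that grows two dicts with: one map computing every combo's
-- union set, ordered dedup of the sizes, and one filter per distinct size; return-value
-- equivalence only (neither program mutates its arguments).

-- ===== PORT A =====
-- B's Python raises the same KeyError on the same inputs; Pre_ excludes them, the port reads with default [] there.
def create_se_set (types : List String) (d : PySem.Dict String (List String)) : PySem.Set String :=
  types.foldl (fun se t => (d.getD t []).foldl (fun se i => PySem.Set.add se i) se) PySem.Set.empty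

def create_se_sets (combos : List (List String)) (type_to_se_dict : List (String × List String)) : (List (Int × List (List String))) × (List (List String × List String)) :=
  let d := PySem.Dict.ofList type_to_se_dict
  let st := combos.foldl
    (fun (st : PySem.Dict Int (List (List String)) × PySem.Dict (List String) (List String)) c =>
      let curr := create_se_set c d
      (if st.1.contains ((curr.length : Int))
         then st.1.modify ((curr.length : Int)) [] (fun v => v ++ [c])
         else st.1.insert ((curr.length : Int)) [c],
       st.2.insert c curr))
    (PySem.Dict.empty, PySem.Dict.empty)
  (st.1.items, st.2.items)

-- ===== PORT B =====
-- set().union(*(type_to_se_dict[t] for t in c)) : union of the lists, exact as a set (first-occurrence order)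
def pySeUnion (c : List String) (d : PySem.Dict String (List String)) : PySem.Set String :=
  PySem.Set.ofList ((c.map (fun t => d.getD t [])).flatten)

def create_se_sets_alt (combos : List (List String)) (type_to_se_dict : List (String × List String)) : (List (Int × List (List String))) × (List (List String × List String)) :=
  let d := PySem.Dict.ofList type_to_se_dict
  let se := combos.map (fun c => pySeUnion c d)
  let sizes := PySem.List.dedup (se.map (fun s => (s.length : Int)))
  let se_lens := sizes.map (fun L => (L, ((combos.zip se).filter (fun p => ((p.2.length : Int) == L))).map (fun p => p.1)))
  let types_to_se := PySem.Dict.ofList (combos.zip se)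
  (se_lens, types_to_se.items)

-- ===== PRECONDITION & SPEC =====
-- Pre_: every type named in a combo is a key of the dict — exactly where Python A (and B) do not raise KeyError.
def Pre_create_se_sets (combos : List (List String)) (type_to_se_dict : List (String × List String)) : Prop :=
  ∀ c ∈ combos, ∀ t ∈ c, t ∈ type_to_se_dict.map Prod.fst
instance (combos : List (List String)) (type_to_se_dict : List (String × List String)) : Decidable (Pre_create_se_sets combos type_to_se_dict) := by unfold Pre_create_se_sets; infer_instance
def pvWitness_create_se_sets : List (List String) × (List (String × List String)) :=
  ([["a"], ["b", "a"], ["a"]], [("a", ["x", "y"]), ("b", ["y", "z"])])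

def Spec_create_se_sets (combos : List (List String)) (type_to_se_dict : List (String × List String)) (out : (List (Int × List (List String))) × (List (List String × List String))) : Prop := out = create_se_sets_alt combos type_to_se_dict
instance (combos : List (List String)) (type_to_se_dict : List (String × List String)) (out : (List (Int × List (List String))) × (List (List String × List String))) : Decidable (Spec_create_se_sets combos type_to_se_dict out) := by unfold Spec_create_se_sets; infer_instance

-- ===== CLAIM (what is proved, stated in full; the proofs are below) =====
def Claim_equal_create_se_sets : Prop := ∀ (combos : List (List String)) (type_to_se_dict : List (String × List String)), Dom_create_se_sets combos type_to_se_dict → Pre_create_se_sets combos type_to_se_dict → Spec_create_se_sets combos type_to_se_dict (create_se_sets combos type_to_se_dict)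

-- ===== LEMMAS AND PROOFS =====
-- l.zip (l.map f) pairs each element with its image
theorem zip_map_self {α β : Type} (l : List α) (f : α → β) :
    l.zip (l.map f) = l.map (fun a => (a, f a)) := by
  induction l with
  | nil => rfl
  | cons x xs ih => simp [ih]

-- the two set builders agree (nested add-loop = ofList of the concatenation)
theorem se_eq (c : List String) (d : PySem.Dict String (List String)) :
    create_se_set c d = pySeUnion c d := by
  simp [create_se_set, pySeUnion, PySem.Set.ofList, List.foldl_flatten, List.foldl_map,
    PySem.Set.empty]

theorem create_se_sets_eq (combos : List (List String)) (type_to_se_dict : List (String × List String)) (_hpre : Pre_create_se_sets combos type_to_se_dict) :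
    create_se_sets combos type_to_se_dict = create_se_sets_alt combos type_to_se_dict := by
  simp only [create_se_sets, create_se_sets_alt]
  generalize PySem.Dict.ofList type_to_se_dict = d
  have hsplit : List.foldl
      (fun (st : PySem.Dict Int (List (List String)) × PySem.Dict (List String) (List String)) c =>
        (if st.1.contains (((create_se_set c d).length : Int))
           then st.1.modify (((create_se_set c d).length : Int)) [] (fun v => v ++ [c])
           else st.1.insert (((create_se_set c d).length : Int)) [c],
         st.2.insert c (create_se_set c d)))
      (PySem.Dict.empty, PySem.Dict.empty) combos
      = (List.foldl (fun d1 c => if d1.contains (((create_se_set c d).length : Int))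
           then d1.modify (((create_se_set c d).length : Int)) [] (fun v => v ++ [c])
           else d1.insert (((create_se_set c d).length : Int)) [c]) PySem.Dict.empty combos,
         List.foldl (fun d2 c => d2.insert c (create_se_set c d)) PySem.Dict.empty combos) :=
    PySem.List.foldl_prod_mk
      (f := fun d1 c => if d1.contains (((create_se_set c d).length : Int))
         then d1.modify (((create_se_set c d).length : Int)) [] (fun v => v ++ [c])
         else d1.insert (((create_se_set c d).length : Int)) [c])
      (g := fun d2 c => d2.insert c (create_se_set c d)) combos PySem.Dict.empty PySem.Dict.empty
  rw [hsplit]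
  simp only [se_eq]
  have hz := zip_map_self combos (fun c => pySeUnion c d)
  refine Prod.ext ?_ ?_
  · -- se_lens component
    have h1 : List.foldl (fun d1 c => if d1.contains (((pySeUnion c d).length : Int))
        then d1.modify (((pySeUnion c d).length : Int)) [] (fun v => v ++ [c])
        else d1.insert (((pySeUnion c d).length : Int)) [c]) PySem.Dict.empty combos
        = List.foldl (fun d1 c => d1.modify (((pySeUnion c d).length : Int)) [] (fun v => v ++ [c])) PySem.Dict.empty combos := by
      refine PySem.List.foldl_congr_mem _ _ _ _ ?_
      intro acc c _
      by_cases h : acc.contains (((pySeUnion c d).length : Int)) = true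
      · simp [h]
      · simp only [Bool.not_eq_true] at h
        simp [h, PySem.Dict.modify, PySem.Dict.getD_of_not_contains acc [] h]
    rw [h1]
    have hnd : (List.foldl (fun d1 c => d1.modify (((pySeUnion c d).length : Int)) [] (fun v => v ++ [c])) PySem.Dict.empty combos).keys.Nodup :=
      PySem.Dict.nodup_keys_foldl_modify_key combos (fun c => (((pySeUnion c d).length : Int))) [] (fun _ c => fun v => v ++ [c]) PySem.Dict.empty PySem.Dict.nodup_keys_empty
    rw [PySem.Dict.items_eq_map_keys _ hnd []]
    have hget : ∀ L : Int, (List.foldl (fun d1 c => d1.modify (((pySeUnion c d).length : Int)) [] (fun v => v ++ [c])) PySem.Dict.empty combos).getD L []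
        = combos.filter (fun c => ((pySeUnion c d).length : Int) == L) := by
      intro L
      have hm : List.foldl (fun d1 c => d1.modify (((pySeUnion c d).length : Int)) [] (fun v => v ++ [c])) PySem.Dict.empty combos
          = List.foldl (fun a (p : Int × List String) => a.modify p.1 [] (fun v => v ++ [p.2])) PySem.Dict.empty (combos.map (fun c => ((((pySeUnion c d).length : Int)), c))) := by
        rw [List.foldl_map]
      rw [hm, PySem.Dict.getD_foldl_modify_append]
      simp [List.filter_map, Function.comp_def]
    rw [PySem.Dict.keys_foldl_modify_key combos (fun c => (((pySeUnion c d).length : Int))) [] (fun _ c => fun v => v ++ [c]) PySem.Dict.empty]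
    simp only [hget, hz, PySem.List.dedup, List.map_map, List.filter_map, Function.comp_def]
    simp [PySem.Set.update, PySem.Set.ofList, PySem.Set.empty]
  · -- types_to_se component
    rw [hz]
    simp only [PySem.Dict.ofList, PySem.Dict.update, List.foldl_map]

-- ===== VERDICT (by name: the statement is the Claim_ definition above) =====
theorem create_se_sets_spec : Claim_equal_create_se_sets := by
  intro combos tds _hdom hpre
  unfold Spec_create_se_sets
  exact create_se_sets_eq combos tds hpre
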